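-- pv_equiv track=rewrite | github.com/Muditha-Kumara/dataAnalytics | test/teacher.py | _split_url_path_and_query
-- ===== SOURCE A (Python) =====
-- def _split_url_path_and_query(u: str, host_parts: list) -> list:
--     path_tokens = []
--     for segment in u.split("/"):
--         for dot_part in segment.split("."):
--             for dash_part in dot_part.split("-"):
--                 token = dash_part.lower()
--                 if (
--                     token
--                     and token not in ["https", "www", "com", "php", "pk", "fi", "http"]
--                     and token not in host_parts
--                 ):
--                     path_tokens.append(token)
--     return path_tokens
-- ===== SOURCE B (Python) =====
-- def _split_url_path_and_query(u: str, host_parts: list) -> list: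
--     # single character-level pass: cut on any of '/', '.', '-' and filter, instead of three nested splits
--     stop = {"https", "www", "com", "php", "pk", "fi", "http"}
--     tokens = []
--     cur = []
--     for ch in u + "/":
--         if ch in "/.-":
--             t = "".join(cur).lower()
--             cur = []
--             if t and t not in stop and t not in host_parts:
--                 tokens.append(t)
--         else:
--             cur.append(ch)
--     return tokens
-- ===== Notes on version B (the rewrite author's own statement) =====
-- stated objective: simpler
-- what changed: Replaced the three nested split loops by a single character-level scan that cuts tokens on any of '/', '.', '-' and filters each token as it is flushed.
import Mathlib
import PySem

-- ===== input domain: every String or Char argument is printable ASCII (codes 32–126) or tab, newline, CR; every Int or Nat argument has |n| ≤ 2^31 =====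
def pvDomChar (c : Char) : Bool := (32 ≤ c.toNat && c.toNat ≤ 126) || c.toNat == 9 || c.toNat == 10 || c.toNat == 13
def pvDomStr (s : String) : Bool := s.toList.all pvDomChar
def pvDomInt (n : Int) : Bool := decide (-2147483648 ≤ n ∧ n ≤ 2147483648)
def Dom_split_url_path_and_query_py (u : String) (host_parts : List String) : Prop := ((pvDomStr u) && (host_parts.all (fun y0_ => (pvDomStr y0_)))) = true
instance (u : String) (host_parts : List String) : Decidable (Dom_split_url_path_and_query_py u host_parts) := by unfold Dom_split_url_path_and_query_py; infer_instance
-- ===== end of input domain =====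

-- B replaces A's three nested split loops by one character-level scan that cuts on '/', '.', '-' (simpler decomposition; same cost).

-- ===== PORT A =====
-- the stopword list of A, as lists of chars (strings are handled on the List Char side throughout)
def pvStopL : List (List Char) :=
  ["https", "www", "com", "php", "pk", "fi", "http"].map String.toList

-- 'token and token not in [stopwords] and token not in host_parts' (shared literal condition of both Pythons)
def pvKeep (t : List Char) (hostl : List (List Char)) : Bool :=
  !t.isEmpty && !(pvStopL.contains t) && !(hostl.contains t)

def split_url_path_and_query_py (u : String) (host_parts : List String) : List String :=
  ((PySem.Chars.splitOn u.toList ['/']).foldl (fun acc segment =>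
      (PySem.Chars.splitOn segment ['.']).foldl (fun acc2 dot_part =>
        (PySem.Chars.splitOn dot_part ['-']).foldl (fun acc3 dash_part =>
          let token := PySem.Chars.lower dash_part
          if pvKeep token (host_parts.map String.toList) then acc3 ++ [token] else acc3) acc2) acc) []).map String.mk

-- ===== PORT B =====
-- 'ch in "/.-"'
def pvDelim (c : Char) : Bool := c == '/' || c == '.' || c == '-'

-- the single scan of Source B: cur = current token chars, toks = output so far
def pvScanB (hostl : List (List Char)) : List Char → List Char → List (List Char) → List (List Char)
  | [], _cur, toks => toks
  | c :: rest, cur, toks =>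
    if pvDelim c then
      let t := PySem.Chars.lower cur
      pvScanB hostl rest [] (if pvKeep t hostl then toks ++ [t] else toks)
    else
      pvScanB hostl rest (cur ++ [c]) toks

def split_url_path_and_query_py_alt (u : String) (host_parts : List String) : List String :=
  (pvScanB (host_parts.map String.toList) (u.toList ++ ['/']) [] []).map String.mk

-- ===== PRECONDITION & SPEC =====
def Spec_split_url_path_and_query_py (u : String) (host_parts : List String) (out : List String) : Prop := out = split_url_path_and_query_py_alt u host_parts
instance (u : String) (host_parts : List String) (out : List String) : Decidable (Spec_split_url_path_and_query_py u host_parts out) := by unfold Spec_split_url_path_and_query_py; infer_instance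

-- ===== CLAIM (what is proved, stated in full; the proofs are below) =====
def Claim_equal_split_url_path_and_query_py : Prop := ∀ (u : String) (host_parts : List String), Dom_split_url_path_and_query_py u host_parts → Spec_split_url_path_and_query_py u host_parts (split_url_path_and_query_py u host_parts)

-- ===== LEMMAS AND PROOFS =====

-- prepend 'pre' to the first piece (the scan's pending prefix)
def pvHcons (pre : List Char) : List (List Char) → List (List Char)
  | [] => [pre]
  | h :: t => (pre ++ h) :: t

-- reference splitter: split a char list on every char satisfying p
def pvSplitP (p : Char → Bool) : List Char → List (List Char)
  | [] => [[]]
  | x :: xs => if p x then [] :: pvSplitP p xs else pvHcons [x] (pvSplitP p xs)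

theorem pvSplitP_ne_nil (p : Char → Bool) (cs : List Char) : pvSplitP p cs ≠ [] := by
  cases cs with
  | nil => simp [pvSplitP]
  | cons x xs =>
    simp only [pvSplitP]
    split
    · simp
    · cases h : pvSplitP p xs <;> simp [pvHcons]

theorem pvHcons_nil_of_ne (l : List (List Char)) (h : l ≠ []) : pvHcons [] l = l := by
  cases l with
  | nil => exact absurd rfl h
  | cons a t => simp [pvHcons]

theorem pvHcons_cons (pre h : List Char) (t : List (List Char)) :
    pvHcons pre (h :: t) = (pre ++ h) :: t := rfl

theorem pvHcons_hcons (pre x : List Char) (l : List (List Char)) :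
    pvHcons pre (pvHcons x l) = pvHcons (pre ++ x) l := by
  cases l <;> simp [pvHcons]

theorem pvHcons_append (x : List Char) (a b : List (List Char)) (ha : a ≠ []) :
    pvHcons x (a ++ b) = pvHcons x a ++ b := by
  cases a with
  | nil => exact absurd rfl ha
  | cons h t => simp [pvHcons]

-- PySem.Chars.splitOn with a single-char separator is pvSplitP on equality with that char
theorem pvSplitOn_go_single (c : Char) (l : List Char) : ∀ (fuel : Nat) (cur : List Char)
    (acc : List (List Char)), l.length ≤ fuel →
    PySem.Chars.splitOn.go [c] fuel l cur acc
      = acc.reverse ++ pvHcons cur.reverse (pvSplitP (fun x => x == c) l) := by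
  induction l with
  | nil =>
    intro fuel cur acc _
    cases fuel <;> simp [PySem.Chars.splitOn.go, pvSplitP, pvHcons]
  | cons x rest ih =>
    intro fuel cur acc hlen
    cases fuel with
    | zero => simp at hlen
    | succ fuel =>
      simp only [PySem.Chars.splitOn.go]
      by_cases hx : x = c
      · subst hx
        have hpre : List.isPrefixOf [x] (x :: rest) = true := by
          simp [List.isPrefixOf]
        rw [if_pos hpre]
        have hdrop : List.drop (List.length [x]) (x :: rest) = rest := by simp
        rw [hdrop, ih fuel [] (cur.reverse :: acc) (by simpa using Nat.le_of_succ_le_succ hlen)]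
        simp only [List.reverse_nil]
        rw [pvHcons_nil_of_ne _ (pvSplitP_ne_nil _ _)]
        simp [pvSplitP, pvHcons]
      · have hpre : List.isPrefixOf [c] (x :: rest) = false := by
          simp [List.isPrefixOf]
          exact fun h => absurd h.symm hx
        rw [if_neg (by simp [hpre])]
        rw [ih fuel (x :: cur) acc (by simpa using Nat.le_of_succ_le_succ hlen)]
        simp only [pvSplitP, beq_iff_eq, if_neg hx, List.reverse_cons]
        rw [pvHcons_hcons]

theorem pvSplitOn_single (c : Char) (l : List Char) :
    PySem.Chars.splitOn l [c] = pvSplitP (fun x => x == c) l := by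
  unfold PySem.Chars.splitOn
  rw [pvSplitOn_go_single c l (l.length + 1) [] [] (Nat.le_succ _)]
  simp [pvHcons_nil_of_ne _ (pvSplitP_ne_nil _ _)]

-- splitting on q then re-splitting every piece on r is splitting on (q or r)
theorem pvSplitP_or (q r : Char → Bool) (cs : List Char) :
    (pvSplitP q cs).flatMap (pvSplitP r) = pvSplitP (fun c => q c || r c) cs := by
  induction cs with
  | nil => simp [pvSplitP]
  | cons x xs ih =>
    simp only [pvSplitP]
    by_cases hq : q x = true
    · simp [hq, ← ih, pvSplitP]
    · have hq' : q x = false := by simpa using hq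
      cases hsq : pvSplitP q xs with
      | nil => exact absurd hsq (pvSplitP_ne_nil _ _)
      | cons h t =>
        have ihx := ih; rw [hsq] at ihx; simp only [List.flatMap_cons] at ihx
        by_cases hr : r x = true
        · simp only [hq', hr, Bool.false_or, Bool.false_eq_true, if_false, if_true, hsq,
            pvHcons_cons, List.flatMap_cons]
          have h1 : pvSplitP r ([x] ++ h) = [] :: pvSplitP r h := by simp [pvSplitP, hr]
          rw [h1, ← ihx]
          simp
        · have hr' : r x = false := by simpa using hr
          simp only [hq', hr', Bool.false_or, Bool.false_eq_true, if_false, hsq,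
            pvHcons_cons, List.flatMap_cons]
          have h1 : pvSplitP r ([x] ++ h) = pvHcons [x] (pvSplitP r h) := by
            simp [pvSplitP, hr']
          rw [h1, ← ihx, pvHcons_append _ _ _ (pvSplitP_ne_nil _ _)]

-- the filter applied-- the filter applied to every token, on the chars side
def pvPf (hostl : List (List Char)) (t : List Char) : Bool := pvKeep (PySem.Chars.lower t) hostl

-- A's innermost loop
theorem pvFoldA3 (hostl : List (List Char)) (l : List (List Char)) (acc : List (List Char)) :
    l.foldl (fun acc3 dash_part =>
        let token := PySem.Chars.lower dash_part
        if pvKeep token hostl then acc3 ++ [token] else acc3) acc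
      = acc ++ (l.filter (pvPf hostl)).map PySem.Chars.lower := by
  induction l generalizing acc with
  | nil => simp
  | cons x xs ih =>
    simp only [List.foldl_cons, List.filter_cons]
    by_cases h : pvPf hostl x = true
    · have h' : pvKeep (PySem.Chars.lower x) hostl = true := h
      simp [h, h', ih]
    · have h' : pvKeep (PySem.Chars.lower x) hostl = false := by
        simpa using h
      simp [h', ih, h]

-- A's middle loop
theorem pvFoldA2 (hostl : List (List Char)) (l : List (List Char)) (acc : List (List Char)) :
    l.foldl (fun acc2 dot_part =>
        (PySem.Chars.splitOn dot_part ['-']).foldl (fun acc3 dash_part =>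
          let token := PySem.Chars.lower dash_part
          if pvKeep token hostl then acc3 ++ [token] else acc3) acc2) acc
      = acc ++ ((l.flatMap (fun d => PySem.Chars.splitOn d ['-'])).filter (pvPf hostl)).map
          PySem.Chars.lower := by
  induction l generalizing acc with
  | nil => simp
  | cons x xs ih =>
    simp only [List.foldl_cons, List.flatMap_cons, List.filter_append, List.map_append]
    rw [pvFoldA3, ih]
    simp [List.append_assoc]

-- A's outer loop
theorem pvFoldA1 (hostl : List (List Char)) (l : List (List Char)) (acc : List (List Char)) :
    l.foldl (fun acc segment =>
        (PySem.Chars.splitOn segment ['.']).foldl (fun acc2 dot_part =>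
          (PySem.Chars.splitOn dot_part ['-']).foldl (fun acc3 dash_part =>
            let token := PySem.Chars.lower dash_part
            if pvKeep token hostl then acc3 ++ [token] else acc3) acc2) acc) acc
      = acc ++ ((l.flatMap (fun seg => (PySem.Chars.splitOn seg ['.']).flatMap
            (fun d => PySem.Chars.splitOn d ['-']))).filter (pvPf hostl)).map
          PySem.Chars.lower := by
  induction l generalizing acc with
  | nil => simp
  | cons x xs ih =>
    simp only [List.foldl_cons, List.flatMap_cons, List.filter_append, List.map_append]
    rw [pvFoldA2, ih]
    simp [List.append_assoc]

-- A on the chars side: filter-map over one flat split on pvDelim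
theorem pvACharacterize (hostl : List (List Char)) (cs : List Char) :
    (PySem.Chars.splitOn cs ['/']).foldl (fun acc segment =>
        (PySem.Chars.splitOn segment ['.']).foldl (fun acc2 dot_part =>
          (PySem.Chars.splitOn dot_part ['-']).foldl (fun acc3 dash_part =>
            let token := PySem.Chars.lower dash_part
            if pvKeep token hostl then acc3 ++ [token] else acc3) acc2) acc) []
      = ((pvSplitP pvDelim cs).filter (pvPf hostl)).map PySem.Chars.lower := by
  rw [pvFoldA1]
  simp only [List.nil_append, pvSplitOn_single]
  have h1 : ∀ seg : List Char,
      (pvSplitP (fun x => x == '.') seg).flatMap (pvSplitP (fun x => x == '-'))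
        = pvSplitP (fun c => c == '.' || c == '-') seg := fun seg => pvSplitP_or _ _ seg
  have h2 : (pvSplitP (fun x => x == '/') cs).flatMap
        (fun seg => pvSplitP (fun c => c == '.' || c == '-') seg)
      = pvSplitP (fun c => c == '/' || (c == '.' || c == '-')) cs := pvSplitP_or _ _ cs
  simp only [h1, h2]
  have : (fun c => c == '/' || (c == '.' || c == '-')) = pvDelim := by
    funext c; simp [pvDelim, Bool.or_assoc]
  rw [this]

-- B's scan, characterized: pending prefix 'cur' joins the first token of the split of the rest
theorem pvScanB_characterize (hostl : List (List Char)) (cs : List Char) :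
    ∀ (cur : List Char) (toks : List (List Char)),
    pvScanB hostl (cs ++ ['/']) cur toks
      = toks ++ ((pvHcons cur (pvSplitP pvDelim cs)).filter (pvPf hostl)).map
          PySem.Chars.lower := by
  induction cs with
  | nil =>
    intro cur toks
    have hd : pvDelim '/' = true := by decide
    simp only [List.nil_append, pvScanB, hd, if_pos]
    simp only [pvSplitP, pvHcons, List.append_nil]
    by_cases h : pvKeep (PySem.Chars.lower cur) hostl = true
    · simp [pvScanB, h, List.filter_cons, pvPf, h]
    · have h' : pvKeep (PySem.Chars.lower cur) hostl = false := by simpa using h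
      simp [pvScanB, h', List.filter_cons, pvPf]
  | cons c rest ih =>
    intro cur toks
    simp only [List.cons_append, pvScanB]
    by_cases hd : pvDelim c = true
    · rw [if_pos hd, ih]
      simp only [pvSplitP, hd, if_pos]
      rw [pvHcons_nil_of_ne _ (pvSplitP_ne_nil _ _)]
      simp only [pvHcons, List.append_nil, List.filter_cons]
      by_cases h : pvKeep (PySem.Chars.lower cur) hostl = true
      · have : pvPf hostl cur = true := h
        simp [this, h]
      · have h' : pvKeep (PySem.Chars.lower cur) hostl = false := by simpa using h
        have : pvPf hostl cur = false := h'
        simp [this, h']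
    · rw [if_neg hd, ih]
      simp only [pvSplitP, hd, if_neg, Bool.not_eq_true]
      rw [pvHcons_hcons]

-- ===== VERDICT (by name: the statement is the Claim_ definition above) =====
theorem split_url_path_and_query_py_spec : Claim_equal_split_url_path_and_query_py := by
  intro u host_parts _
  unfold Spec_split_url_path_and_query_py
  unfold split_url_path_and_query_py split_url_path_and_query_py_alt
  rw [pvScanB_characterize, pvACharacterize]
  rw [pvHcons_nil_of_ne _ (pvSplitP_ne_nil _ _)]
  simp
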